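-- pv_equiv track=rewrite | github.com/Redcom1988/balinese-grammar-parser | old/alternative-parser.py | build_phrase_structure
-- ===== SOURCE A (Python) =====
-- def build_phrase_structure(categories, derivation):
--     """Build phrase structure with improved compound noun and predicate handling."""
--     i = 0
--     while i < len(categories):
--         # Handle compound nouns (e.g., "adik tiange")
--         if i < len(categories) - 1:
--             if categories[i] == 'Noun' and categories[i + 1] == 'Noun':
--                 derivation.append(f"Combining compound noun: {categories[i]} + {categories[i + 1]} → NP")
--                 categories[i:i + 2] = ['NP']
--                 continue
--
--             # Handle Adj/Adv + Verb as predicate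
--             if (categories[i] in ['Adj', 'Adv']) and categories[i + 1] == 'Verb':
--                 derivation.append(f"Combining {categories[i]} + Verb → VP")
--                 categories[i:i + 2] = ['VP']
--                 continue
--
--             # Handle PP formation
--             if categories[i] == 'Prep':
--                 if i + 2 < len(categories) and categories[i + 1] == 'Noun' and categories[i + 2] == 'Noun':
--                     # Handle PPs with compound nouns
--                     derivation.append(f"Combining Prep + compound noun → PP")
--                     categories[i:i + 3] = ['PP']
--                     continue
--                 elif categories[i + 1] in ['NP', 'Noun']:
--                     derivation.append(f"Combining Prep + {categories[i + 1]} → PP")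
--                     categories[i:i + 2] = ['PP']
--                     continue
--
--         # Basic category conversions
--         if categories[i] == 'Noun':
--             categories[i] = 'NP'
--             derivation.append(f"Converting Noun → NP")
--         elif categories[i] == 'Verb':
--             categories[i] = 'VP'
--             derivation.append(f"Converting Verb → VP")
--
--         i += 1
--
--     return categories
-- ===== SOURCE B (Python) =====
-- def build_phrase_structure(categories, derivation):
--     """Single forward pass: emit one merged/converted symbol per step instead of
--     splicing and rescanning the input list. (Matches A's return value and its
--     in-place mutation of categories and derivation.)"""
--     out = []
--     n = len(categories)
--     i = 0
--     while i < n: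
--         c = categories[i]
--         nxt = categories[i + 1] if i + 1 < n else None
--         if c == 'Noun' and nxt == 'Noun':
--             derivation.append("Combining compound noun: Noun + Noun → NP")
--             out.append('NP')
--             i += 2
--         elif c in ('Adj', 'Adv') and nxt == 'Verb':
--             derivation.append(f"Combining {c} + Verb → VP")
--             out.append('VP')
--             i += 2
--         elif c == 'Prep' and nxt == 'Noun' and i + 2 < n and categories[i + 2] == 'Noun':
--             derivation.append("Combining Prep + compound noun → PP")
--             out.append('PP')
--             i += 3
--         elif c == 'Prep' and nxt in ('NP', 'Noun'):
--             derivation.append(f"Combining Prep + {nxt} → PP")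
--             out.append('PP')
--             i += 2
--         elif c == 'Noun':
--             derivation.append("Converting Noun → NP")
--             out.append('NP')
--             i += 1
--         elif c == 'Verb':
--             derivation.append("Converting Verb → VP")
--             out.append('VP')
--             i += 1
--         else:
--             out.append(c)
--             i += 1
--     categories[:] = out
--     return categories
-- ===== Notes on version B (the rewrite author's own statement) =====
-- stated objective: alternative
-- what changed: A repeatedly splices the merged symbol back into the list and rescans from the same index; B does one forward pass over the input, consuming 1-3 symbols per step and appending the merged/converted symbol to a fresh output list.
import Mathlib
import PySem

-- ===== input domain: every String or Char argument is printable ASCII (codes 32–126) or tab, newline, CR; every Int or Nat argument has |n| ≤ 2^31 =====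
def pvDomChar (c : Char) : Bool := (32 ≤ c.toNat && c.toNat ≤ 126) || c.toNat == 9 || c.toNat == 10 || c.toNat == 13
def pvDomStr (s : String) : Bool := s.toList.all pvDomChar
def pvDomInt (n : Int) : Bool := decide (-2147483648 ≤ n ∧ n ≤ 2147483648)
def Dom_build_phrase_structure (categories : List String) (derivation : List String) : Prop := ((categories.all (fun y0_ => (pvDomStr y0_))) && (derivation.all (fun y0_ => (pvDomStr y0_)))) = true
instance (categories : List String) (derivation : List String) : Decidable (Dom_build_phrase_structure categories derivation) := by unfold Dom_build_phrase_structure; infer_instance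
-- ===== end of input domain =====

-- B replaces A's in-place list splicing + rescan by a single forward pass that
-- emits one merged/converted symbol per step; return values agree.
-- Both Pythons mutate `categories` and append log lines to `derivation` in place;
-- the equivalence proved here is about the RETURN value (B performs the same
-- mutations in Python; the log list never influences the return value, so the
-- ports take `derivation` but do not use it).

-- ===== PORT A =====
-- A's while loop over a spliced list, iteration by iteration: the processed prefix
-- (positions < i, never re-read by A) is emitted as cons; a splice
-- `categories[i:i+k] = [m]; continue` becomes recursing on `m :: remainder`;
-- `i += 1` becomes emitting the (possibly converted) head and recursing on the rest.
-- The basic Noun→NP / Verb→VP conversion of A's loop tail: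
def convA (c : String) : String :=
  if c = "Noun" then "NP" else if c = "Verb" then "VP" else c

-- the [c, n1] row is A's `i + 2 < len(categories)` guard being false
def buildA : List String → List String
  | [] => []
  | [c] => convA c :: buildA []
  | [c, n1] =>
    if c = "Noun" ∧ n1 = "Noun" then buildA ["NP"]
    else if (c = "Adj" ∨ c = "Adv") ∧ n1 = "Verb" then buildA ["VP"]
    else if c = "Prep" then
      if n1 = "NP" ∨ n1 = "Noun" then buildA ["PP"]
      else c :: buildA [n1]  -- "Prep" is neither "Noun" nor "Verb": no conversion
    else convA c :: buildA [n1]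
  | c :: n1 :: n2 :: rest2 =>
    if c = "Noun" ∧ n1 = "Noun" then buildA ("NP" :: n2 :: rest2)
    else if (c = "Adj" ∨ c = "Adv") ∧ n1 = "Verb" then buildA ("VP" :: n2 :: rest2)
    else if c = "Prep" then
      if n1 = "Noun" ∧ n2 = "Noun" then buildA ("PP" :: rest2)
      else if n1 = "NP" ∨ n1 = "Noun" then buildA ("PP" :: n2 :: rest2)
      else c :: buildA (n1 :: n2 :: rest2)
    else convA c :: buildA (n1 :: n2 :: rest2)
  termination_by xs => xs.length
  decreasing_by all_goals simp


def build_phrase_structure (categories : List String) (derivation : List String) : List String :=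
  buildA categories

-- ===== PORT B =====
-- B's lookahead conditions with `i += k` become multi-element patterns that
-- consume k symbols and emit the merged symbol directly (same branch order).
def buildB : List String → List String
  | "Noun" :: "Noun" :: rest => "NP" :: buildB rest
  | "Adj" :: "Verb" :: rest => "VP" :: buildB rest
  | "Adv" :: "Verb" :: rest => "VP" :: buildB rest
  | "Prep" :: "Noun" :: "Noun" :: rest => "PP" :: buildB rest
  | "Prep" :: "Noun" :: rest => "PP" :: buildB rest
  | "Prep" :: "NP" :: rest => "PP" :: buildB rest
  | "Noun" :: rest => "NP" :: buildB rest
  | "Verb" :: rest => "VP" :: buildB rest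
  | c :: rest => c :: buildB rest
  | [] => []

def build_phrase_structure_alt (categories : List String) (derivation : List String) : List String :=
  buildB categories

-- ===== PRECONDITION & SPEC =====
def Spec_build_phrase_structure (categories : List String) (derivation : List String) (out : List String) : Prop := out = build_phrase_structure_alt categories derivation
instance (categories : List String) (derivation : List String) (out : List String) : Decidable (Spec_build_phrase_structure categories derivation out) := by unfold Spec_build_phrase_structure; infer_instance

-- ===== CLAIM (what is proved, stated in full; the proofs are below) =====
def Claim_equal_build_phrase_structure : Prop := ∀ (categories : List String) (derivation : List String), Dom_build_phrase_structure categories derivation → Spec_build_phrase_structure categories derivation (build_phrase_structure categories derivation)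

-- ===== LEMMAS AND PROOFS =====

-- merged symbols are inert for buildB: they head no rule, so they pass through
theorem buildB_NP (r : List String) : buildB ("NP" :: r) = "NP" :: buildB r := by
  simp [buildB]

theorem buildB_VP (r : List String) : buildB ("VP" :: r) = "VP" :: buildB r := by
  simp [buildB]

theorem buildB_PP (r : List String) : buildB ("PP" :: r) = "PP" :: buildB r := by
  simp [buildB]

theorem buildB_one (c : String) : buildB [c] = [convA c] := by
  by_cases h1 : c = "Noun" <;> by_cases h2 : c = "Verb" <;> simp_all [buildB, convA]

theorem buildB_step (c n1 : String) (r : List String)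
    (h1 : ¬(c = "Noun" ∧ n1 = "Noun"))
    (h2 : ¬((c = "Adj" ∨ c = "Adv") ∧ n1 = "Verb"))
    (h3 : ¬c = "Prep") :
    buildB (c :: n1 :: r) = convA c :: buildB (n1 :: r) := by
  by_cases hN : c = "Noun" <;> by_cases hV : c = "Verb" <;>
    by_cases hJ : c = "Adj" <;> by_cases hD : c = "Adv" <;>
      simp_all [buildB, convA]

theorem buildA_eq_buildB (xs : List String) : buildA xs = buildB xs := by
  induction xs using buildA.induct with
  | case1 => simp [buildA, buildB]
  | case2 c => simp [buildA, buildB_one]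
  | case3 c n1 h ih => obtain ⟨rfl, rfl⟩ := h; simp_all [buildA, buildB]
  | case4 c n1 h0 h ih => obtain ⟨rfl | rfl, rfl⟩ := h <;> simp_all [buildA, buildB]
  | case5 n1 h h1 h2 ih => obtain rfl | rfl := h <;> simp_all [buildA, buildB]
  | case6 n1 h h1 h2 ih => simp_all [buildA, buildB]
  | case7 c n1 h1 h2 h3 ih =>
    rw [show buildB [c, n1] = convA c :: buildB [n1] from buildB_step c n1 [] h1 h2 h3,
      buildB_one]
    simp [buildA, h1, h2, h3]
  | case8 c n1 n2 r h ih => obtain ⟨rfl, rfl⟩ := h; simp_all [buildA, buildB, buildB_NP]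
  | case9 c n1 n2 r h0 h ih => obtain ⟨rfl | rfl, rfl⟩ := h <;> simp_all [buildA, buildB, buildB_VP]
  | case10 n1 n2 r h h1 h2 ih => obtain ⟨rfl, rfl⟩ := h; simp_all [buildA, buildB, buildB_PP]
  | case11 n1 n2 r h0 h h1 h2 ih => obtain rfl | rfl := h <;> simp_all [buildA, buildB, buildB_PP]
  | case12 n1 n2 r h0 h h1 h2 ih => simp_all [buildA, buildB]
  | case13 c n1 n2 r h1 h2 h3 ih =>
    rw [buildB_step c n1 (n2 :: r) h1 h2 h3, ← ih]
    simp [buildA, h1, h2, h3]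

-- ===== VERDICT (by name: the statement is the Claim_ definition above) =====
theorem build_phrase_structure_spec : Claim_equal_build_phrase_structure := by
  intro categories derivation _
  unfold Spec_build_phrase_structure build_phrase_structure build_phrase_structure_alt
  exact buildA_eq_buildB categories
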